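-- pv_equiv track=rewrite | github.com/innjuun/Algorithm | codility/na_3.py | solution
-- ===== SOURCE A (Python) =====
-- from collections import defaultdict
--
-- def solution(A):
--     # write your code in Python 3.6
--     dic = defaultdict(int)
--     answer = []
--     for num in A:
--         if -num in dic:
--             answer.append(abs(num))
--         dic[num] = 1
--     if answer:
--         return max(answer)
--     return 0
-- ===== SOURCE B (Python) =====
-- def solution(A):
--     B = sorted(A)
--     i, j = 0, len(B) - 1
--     while i < j:
--         s = B[i] + B[j]
--         if s == 0:
--             return B[j]
--         if s < 0:
--             i += 1
--         else:
--             j -= 1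
--     return 0
-- ===== Notes on version B (the rewrite author's own statement) =====
-- stated objective: alternative
-- what changed: Replaces the hash-dict single pass that collects every matched abs into a list and takes its max with sort-then-two-pointers: after sorting, pointers move in from both ends and the first zero-sum pair found is returned, with no auxiliary dict or answer list.
import Mathlib
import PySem

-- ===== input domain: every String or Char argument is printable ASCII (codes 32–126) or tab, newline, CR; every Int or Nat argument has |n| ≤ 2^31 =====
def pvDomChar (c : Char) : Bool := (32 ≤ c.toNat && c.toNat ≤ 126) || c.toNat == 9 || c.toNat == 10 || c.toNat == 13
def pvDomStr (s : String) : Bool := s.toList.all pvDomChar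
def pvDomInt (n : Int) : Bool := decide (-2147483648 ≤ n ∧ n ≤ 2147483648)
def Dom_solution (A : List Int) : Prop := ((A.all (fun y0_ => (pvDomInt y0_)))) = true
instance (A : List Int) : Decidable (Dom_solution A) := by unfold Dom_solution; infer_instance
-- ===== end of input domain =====

-- B replaces A's hash-set single pass by sort + two pointers moving in from both ends (alternative algorithm, same value).

-- ===== PORT A =====
-- the loop: for num in A: if -num in dic: answer.append(abs(num)); dic[num] = 1
def solLoop : List Int → PySem.Dict Int Int → List Int → PySem.Dict Int Int × List Int
  | [], dic, answer => (dic, answer)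
  | num :: rest, dic, answer =>
      solLoop rest (dic.insert num 1)
        (if dic.contains (-num) then answer ++ [|num|] else answer)

def solution (A : List Int) : Int :=
  let st := solLoop A PySem.Dict.empty []
  let answer := st.2
  if answer = [] then 0
  else (PySem.List.max? answer (fun y => y)).getD 0

-- ===== PORT B =====
-- while i < j: s = B[i]+B[j]; if s == 0: return B[j]; if s < 0: i += 1 else: j -= 1
-- (B[i]/B[j] are read only when 0 ≤ i < j ≤ len-1, so getD's default 0 is never used)
def twoPtr (Bs : List Int) (i j : Nat) : Int :=
  if h : i < j then
    if Bs.getD i 0 + Bs.getD j 0 = 0 then Bs.getD j 0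
    else if Bs.getD i 0 + Bs.getD j 0 < 0 then twoPtr Bs (i + 1) j
    else twoPtr Bs i (j - 1)
  else 0
termination_by j - i
decreasing_by all_goals omega

def solution_alt (A : List Int) : Int :=
  let B := PySem.List.sorted A (fun x => x) false
  twoPtr B 0 (B.length - 1)

-- ===== PRECONDITION & SPEC =====
def Spec_solution (A : List Int) (out : Int) : Prop := out = solution_alt A
instance (A : List Int) (out : Int) : Decidable (Spec_solution A out) := by unfold Spec_solution; infer_instance

-- ===== CLAIM (what is proved, stated in full; the proofs are below) =====
def Claim_equal_solution : Prop := ∀ (A : List Int), Dom_solution A → Spec_solution A (solution A)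

-- ===== LEMMAS AND PROOFS =====

-- x forms a +/- pair inside L (a single 0 does not pair with itself)
def Pair (L : List Int) (x : Int) : Prop :=
  x ∈ L ∧ -x ∈ L ∧ (x = 0 → 2 ≤ L.count 0)

theorem pair_cons (L : List Int) (num x : Int) (h : Pair L x) : Pair (num :: L) x := by
  obtain ⟨h1, h2, h3⟩ := h
  exact ⟨List.mem_cons_of_mem _ h1, List.mem_cons_of_mem _ h2,
    fun h0 => le_trans (h3 h0) (List.count_le_count_cons ..)⟩

theorem pair_neg (L : List Int) (x : Int) (h : Pair L x) : Pair L (-x) := by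
  obtain ⟨h1, h2, h3⟩ := h
  exact ⟨h2, by simpa, fun h0 => h3 (by omega)⟩

theorem pair_perm (L L' : List Int) (x : Int) (hp : L.Perm L') (h : Pair L x) : Pair L' x := by
  obtain ⟨h1, h2, h3⟩ := h
  exact ⟨hp.mem_iff.1 h1, hp.mem_iff.1 h2, fun h0 => (hp.count_eq 0) ▸ h3 h0⟩

-- two distinct positions with the same value give count ≥ 2
theorem two_le_count_of_idx (L : List Int) (p q : Nat) (a : Int)
    (hpq : p < q) (hq : q < L.length) (hp' : L.getD p 0 = a) (hq' : L.getD q 0 = a) :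
    2 ≤ L.count a := by
  have hp : p < L.length := lt_trans hpq hq
  rw [List.getD_eq_getElem L 0 hp] at hp'
  rw [List.getD_eq_getElem L 0 hq] at hq'
  have h1 : a ∈ L.take q := by
    have h := List.getElem_take (xs := L) (j := q) (i := p) (h := by simp; omega)
    rw [← hp', ← h]; exact List.getElem_mem _
  have h2 : a ∈ L.drop q := by
    have h := List.getElem_drop (xs := L) (i := q) (j := 0) (h := by simp; omega)
    simp only [Nat.add_zero] at h
    rw [← hq', ← h]; exact List.getElem_mem _
  have hc : L.count a = (L.take q).count a + (L.drop q).count a := by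
    conv_lhs => rw [← List.take_append_drop q L]
    exact List.count_append ..
  have c1 := List.one_le_count_iff.2 h1
  have c2 := List.one_le_count_iff.2 h2
  omega

-- count ≥ 2 gives two distinct positions
theorem exists_two_idx_of_count (L : List Int) (a : Int) (h : 2 ≤ L.count a) :
    ∃ p q, p < q ∧ q < L.length ∧ L.getD p 0 = a ∧ L.getD q 0 = a := by
  induction L with
  | nil => simp at h
  | cons b t ih =>
      by_cases hb : b = a
      · rw [hb, List.count_cons_self] at h
        have ht : a ∈ t := List.one_le_count_iff.1 (by omega)
        obtain ⟨n, hn, hv⟩ := List.getElem_of_mem ht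
        refine ⟨0, n + 1, by omega, by simp; omega, by simpa, ?_⟩
        rw [List.getD_cons_succ, List.getD_eq_getElem t 0 hn, hv]
      · rw [List.count_cons_of_ne hb] at h
        obtain ⟨p, q, h1, h2, h3, h4⟩ := ih h
        exact ⟨p + 1, q + 1, by omega, by simp; omega, by simpa, by simpa⟩

-- ===== A-side characterisation =====
theorem solLoop_mono (L : List Int) (d : PySem.Dict Int Int) (ans : List Int) (y : Int)
    (h : y ∈ ans) : y ∈ (solLoop L d ans).2 := by
  induction L generalizing d ans with
  | nil => exact h
  | cons num rest ih =>
      simp only [solLoop]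
      apply ih
      split <;> simp [h]

-- every collected value is |x| for x either pairing with the seed dict or forming a pair in L
theorem solLoop_up (L : List Int) (d : PySem.Dict Int Int) (ans : List Int) (y : Int)
    (h : y ∈ (solLoop L d ans).2) :
    y ∈ ans ∨ (∃ x, y = |x| ∧ d.contains (-x) = true ∧ x ∈ L) ∨ (∃ x, y = |x| ∧ Pair L x) := by
  induction L generalizing d ans with
  | nil => exact Or.inl h
  | cons num rest ih =>
      simp only [solLoop] at h
      rcases ih _ _ h with h' | ⟨x, hy, hc, hx⟩ | ⟨x, hy, hp⟩
      · by_cases hc : d.contains (-num) = true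
        · rw [if_pos hc] at h'
          rcases List.mem_append.1 h' with h'' | h''
          · exact Or.inl h''
          · have : y = |num| := List.mem_singleton.1 h''
            exact Or.inr (Or.inl ⟨num, this, hc, by simp⟩)
        · rw [if_neg hc] at h'
          exact Or.inl h'
      · rw [PySem.Dict.contains_insert, Bool.or_eq_true] at hc
        rcases hc with hc | hc
        · have hxn : -x = num := beq_iff_eq.1 hc
          refine Or.inr (Or.inr ⟨x, hy, List.mem_cons_of_mem _ hx, by rw [hxn]; simp, ?_⟩)
          intro h0
          rw [h0] at hxn hx
          simp at hxn
          rw [← hxn, List.count_cons_self]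
          have := List.one_le_count_iff.2 hx
          omega
        · exact Or.inr (Or.inl ⟨x, hy, hc, List.mem_cons_of_mem _ hx⟩)
      · exact Or.inr (Or.inr ⟨x, hy, pair_cons _ _ _ hp⟩)

-- if -y is already recorded and y is still to come, |y| gets collected
theorem solLoop_down' (L : List Int) (d : PySem.Dict Int Int) (ans : List Int) (y : Int)
    (hy : y ∈ L) (hc : d.contains (-y) = true) : |y| ∈ (solLoop L d ans).2 := by
  induction L generalizing d ans with
  | nil => cases hy
  | cons num rest ih =>
      simp only [solLoop]
      rcases List.mem_cons.1 hy with rfl | hy'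
      · rw [if_pos hc]
        exact solLoop_mono _ _ _ _ (by simp)
      · refine ih _ _ hy' ?_
        rw [PySem.Dict.contains_insert, hc, Bool.or_true]

theorem zero_down (L : List Int) (d : PySem.Dict Int Int) (ans : List Int)
    (h : 2 ≤ L.count 0) : (0:Int) ∈ (solLoop L d ans).2 := by
  induction L generalizing d ans with
  | nil => simp at h
  | cons num rest ih =>
      simp only [solLoop]
      by_cases h0 : num = 0
      · subst h0
        rw [List.count_cons_self] at h
        have ht : (0:Int) ∈ rest := List.one_le_count_iff.1 (by omega)
        have h' := solLoop_down' rest (PySem.Dict.insert d 0 1)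
          (if PySem.Dict.contains d (-0) then ans ++ [|(0:Int)|] else ans) 0 ht
          (by rw [neg_zero, PySem.Dict.contains_insert]; simp)
        simpa using h'
      · rw [List.count_cons_of_ne h0] at h
        exact ih _ _ h

theorem solLoop_down_ne (L : List Int) (d : PySem.Dict Int Int) (ans : List Int) (x : Int)
    (hx : x ∈ L) (hnx : -x ∈ L) (h0 : x ≠ 0) : |x| ∈ (solLoop L d ans).2 := by
  induction L generalizing d ans with
  | nil => cases hx
  | cons num rest ih =>
      simp only [solLoop]
      rcases List.mem_cons.1 hx with rfl | hx'
      · have hnx' : -x ∈ rest := by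
          rcases List.mem_cons.1 hnx with h | h
          · exact absurd (by omega : x = 0) h0
          · exact h
        rw [← abs_neg x]
        refine solLoop_down' _ _ _ _ hnx' ?_
        rw [neg_neg, PySem.Dict.contains_insert]
        simp
      · rcases List.mem_cons.1 hnx with h | hnx'
        · refine solLoop_down' _ _ _ _ hx' ?_
          rw [PySem.Dict.contains_insert]
          have hb : (-x == num) = true := by simp [h]
          simp [hb]
        · exact ih _ _ hx' hnx'

-- every pair contributes its absolute value
theorem solLoop_down (L : List Int) (d : PySem.Dict Int Int) (ans : List Int) (x : Int)
    (hx : Pair L x) : |x| ∈ (solLoop L d ans).2 := by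
  obtain ⟨h1, h2, h3⟩ := hx
  by_cases h0 : x = 0
  · rw [h0, abs_zero]
    exact zero_down L d ans (h3 h0)
  · exact solLoop_down_ne L d ans x h1 h2 h0

-- A's return value is the running max (with default 0) of the nonnegative answer list
theorem res_eq_foldl (l : List Int) (hnn : ∀ y ∈ l, 0 ≤ y) :
    (if l = [] then (0:Int) else (PySem.List.max? l (fun y => y)).getD 0) = l.foldl max 0 := by
  cases l with
  | nil => simp
  | cons x t =>
      have hx : 0 ≤ x := hnn x (by simp)
      rw [if_neg (by simp), PySem.List.max?_id_cons]
      simp [List.foldl, max_eq_right hx]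

-- ===== B-side: the two-pointer scan =====
-- with no zero-sum index pair at all, the scan returns 0
theorem twoPtr_noPair (Bs : List Int)
    (hnp : ∀ p q, p < q → q < Bs.length → Bs.getD p 0 + Bs.getD q 0 ≠ 0) :
    ∀ i j, j < Bs.length → twoPtr Bs i j = 0 := by
  intro i j
  induction hn : j - i using Nat.strong_induction_on generalizing i j with
  | _ n ih =>
    intro hj
    rw [twoPtr]
    by_cases hij : i < j
    · rw [dif_pos hij, if_neg (hnp i j hij hj)]
      by_cases hlt : Bs.getD i 0 + Bs.getD j 0 < 0
      · rw [if_pos hlt]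
        exact ih (j - (i+1)) (by omega) (i+1) j rfl hj
      · rw [if_neg hlt]
        exact ih ((j-1) - i) (by omega) i (j-1) rfl (by omega)
    · rw [dif_neg hij]

-- invariant: a maximal zero-sum pair (p,q) inside [i,j] is never skipped, and its value is returned
theorem twoPtr_inv (Bs : List Int)
    (hs : ∀ a b, a ≤ b → b < Bs.length → Bs.getD a 0 ≤ Bs.getD b 0)
    (p q : Nat) (hpq : p < q) (hsum : Bs.getD p 0 + Bs.getD q 0 = 0)
    (hmax : ∀ p' q', p' < q' → q' < Bs.length → Bs.getD p' 0 + Bs.getD q' 0 = 0 →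
      Bs.getD q' 0 ≤ Bs.getD q 0) :
    ∀ i j, i ≤ p → q ≤ j → j < Bs.length → twoPtr Bs i j = Bs.getD q 0 := by
  intro i j
  induction hn : j - i using Nat.strong_induction_on generalizing i j with
  | _ n ih =>
    intro hip hqj hj
    have hij : i < j := by omega
    rw [twoPtr, dif_pos hij]
    by_cases h0 : Bs.getD i 0 + Bs.getD j 0 = 0
    · rw [if_pos h0]
      have h1 : Bs.getD j 0 ≤ Bs.getD q 0 := hmax i j hij hj h0
      have h2 : Bs.getD q 0 ≤ Bs.getD j 0 := hs q j hqj hj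
      omega
    · rw [if_neg h0]
      by_cases hlt : Bs.getD i 0 + Bs.getD j 0 < 0
      · rw [if_pos hlt]
        have hip' : i ≠ p := by
          intro he
          have h2 : Bs.getD q 0 ≤ Bs.getD j 0 := hs q j hqj hj
          rw [he] at hlt
          omega
        exact ih (j - (i+1)) (by omega) (i+1) j rfl (by omega) hqj hj
      · rw [if_neg hlt]
        have hjq : j ≠ q := by
          intro he
          have h2 : Bs.getD i 0 ≤ Bs.getD p 0 := hs i p hip (by omega)
          rw [he] at hlt h0
          omega
        exact ih ((j-1) - i) (by omega) i (j-1) rfl hip (by omega) (by omega)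

-- ===== VERDICT (by name: the statement is the Claim_ definition above) =====
theorem solution_spec : Claim_equal_solution := by
  intro A _hdom
  unfold Spec_solution solution solution_alt
  set ansA := (solLoop A PySem.Dict.empty []).2 with hansA
  set Bs := PySem.List.sorted A (fun x => x) false with hBs
  have hperm : Bs.Perm A := PySem.List.sorted_perm ..
  have hs : ∀ a b, a ≤ b → b < Bs.length → Bs.getD a 0 ≤ Bs.getD b 0 := by
    intro a b hab hb
    rw [List.getD_eq_getElem Bs 0 (by omega), List.getD_eq_getElem Bs 0 hb]
    exact PySem.List.sorted_id_getElem_mono A hab (by rw [← hBs]; exact hb)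
  have upA : ∀ y ∈ ansA, ∃ x, y = |x| ∧ Pair A x := by
    intro y hy
    rcases solLoop_up A _ _ y hy with h | ⟨x, _, hc, _⟩ | hx
    · cases h
    · rw [PySem.Dict.contains_empty] at hc; cases hc
    · exact hx
  have downA : ∀ x, Pair A x → |x| ∈ ansA := fun x hx => solLoop_down A _ _ x hx
  -- any zero-sum index pair of Bs yields a Pair of A with value Bs[q']
  have idxPair : ∀ p' q', p' < q' → q' < Bs.length → Bs.getD p' 0 + Bs.getD q' 0 = 0 →
      Pair A (Bs.getD q' 0) := by
    intro p' q' h1 h2 h3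
    have hqm : Bs.getD q' 0 ∈ Bs := by
      rw [List.getD_eq_getElem Bs 0 h2]; exact List.getElem_mem _
    have hpm : -(Bs.getD q' 0) ∈ Bs := by
      have : Bs.getD p' 0 = -(Bs.getD q' 0) := by omega
      rw [← this, List.getD_eq_getElem Bs 0 (by omega)]; exact List.getElem_mem _
    refine pair_perm Bs A _ hperm ⟨hqm, hpm, ?_⟩
    intro h0
    exact two_le_count_of_idx Bs p' q' 0 h1 h2 (by omega) (by omega)
  by_cases hE : ansA = []
  · -- no pair at all: both sides return 0
    rw [if_pos hE]
    have hnp : ∀ p q, p < q → q < Bs.length → Bs.getD p 0 + Bs.getD q 0 ≠ 0 := by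
      intro p q h1 h2 h3
      have := downA _ (idxPair p q h1 h2 h3)
      rw [hE] at this
      cases this
    by_cases h0 : Bs.length = 0
    · rw [twoPtr]
      simp [h0]
    · exact (twoPtr_noPair Bs hnp 0 (Bs.length - 1) (by omega)).symm
  · -- a pair exists; M = A's answer is the maximal pair value
    have nnA : ∀ y ∈ ansA, 0 ≤ y := by
      intro y hy; rcases upA y hy with ⟨x, rfl, _⟩; exact abs_nonneg x
    rw [res_eq_foldl ansA nnA]
    set M := ansA.foldl max 0 with hM
    obtain ⟨y0, hy0⟩ := List.exists_mem_of_ne_nil ansA hE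
    have hMmem : M ∈ ansA := by
      rcases PySem.List.foldl_max_mem ansA 0 with h | h
      · have hle := (PySem.List.le_foldl_max ansA 0).2 y0 hy0
        have h0 := nnA y0 hy0
        have : y0 = M := by omega
        rwa [← this]
      · exact h
    obtain ⟨x, hxM, hxP⟩ := upA M hMmem
    have hM0 : 0 ≤ M := nnA M hMmem
    have hPairM : Pair A M := by
      rcases abs_cases x with ⟨h, _⟩ | ⟨h, _⟩
      · rwa [hxM, h]
      · rw [hxM, h]
        exact pair_neg A x hxP
    have hmaxM : ∀ z, Pair A z → |z| ≤ M :=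
      fun z hz => (PySem.List.le_foldl_max ansA 0).2 _ (downA z hz)
    have hPairBsM : Pair Bs M := pair_perm A Bs M hperm.symm hPairM
    obtain ⟨p, q, hpq, hq, hp', hq'⟩ :
        ∃ p q, p < q ∧ q < Bs.length ∧ Bs.getD p 0 = -M ∧ Bs.getD q 0 = M := by
      by_cases hMz : M = 0
      · obtain ⟨p, q, h1, h2, h3, h4⟩ :=
          exists_two_idx_of_count Bs 0 (hPairBsM.2.2 hMz)
        exact ⟨p, q, h1, h2, by rw [hMz, neg_zero]; exact h3, by rw [hMz]; exact h4⟩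
      · obtain ⟨qi, hqi, hqv⟩ := List.getElem_of_mem hPairBsM.1
        obtain ⟨pi, hpi, hpv⟩ := List.getElem_of_mem hPairBsM.2.1
        have hgq : Bs.getD qi 0 = M := by rw [List.getD_eq_getElem Bs 0 hqi, hqv]
        have hgp : Bs.getD pi 0 = -M := by rw [List.getD_eq_getElem Bs 0 hpi, hpv]
        refine ⟨pi, qi, ?_, hqi, hgp, hgq⟩
        by_contra hle
        have : Bs.getD qi 0 ≤ Bs.getD pi 0 := hs qi pi (by omega) hpi
        omega
    have hres := twoPtr_inv Bs hs p q hpq (by omega)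
      (by
        intro p' q' h1 h2 h3
        have hPz := idxPair p' q' h1 h2 h3
        have habs := hmaxM _ hPz
        have hnn : 0 ≤ Bs.getD q' 0 := by
          have := hs p' q' (by omega) h2
          omega
        rw [abs_of_nonneg hnn] at habs
        omega)
      0 (Bs.length - 1) (by omega) (by omega) (by omega)
    rw [hres, hq']
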